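-- pv_equiv track=rewrite | github.com/AlgoMathITMO/public-transport-network | ptn/osm.py | is_education_research
-- ===== SOURCE A (Python) =====
-- from typing import List, Tuple
--
-- def is_any_pair_present(tags: dict, items: List[Tuple[str, str]]) -> bool:
--     return isinstance(tags, dict) \
--            and any((key, value) in items for key, value in tags.items())
--
-- def is_education_research(tags: dict) -> bool:
--     items = []
--     items += [('amenity', val) for val in ['school', 'college', 'language_school',
--                                            'driving_school', 'music_school',
--                                            'preschool', 'kindergarten', 'university',
--                                            'training', 'education', 'research_institute']]
--     items += [('office', val) for val in ['educational_institution', 'research']]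
--     items += [('building', val) for val in ['school', 'university']]
--
--     return is_any_pair_present(tags, items)
-- ===== SOURCE B (Python) =====
-- _TARGETS = {
--     'amenity': {'school', 'college', 'language_school', 'driving_school',
--                 'music_school', 'preschool', 'kindergarten', 'university',
--                 'training', 'education', 'research_institute'},
--     'office': {'educational_institution', 'research'},
--     'building': {'school', 'university'},
-- }
--
--
-- def is_education_research(tags: dict) -> bool:
--     return isinstance(tags, dict) and any(
--         tags.get(key) in values for key, values in _TARGETS.items())
-- ===== Notes on version B (the rewrite author's own statement) =====
-- stated objective: faster
-- what changed: Instead of building a 15-element pair list and scanning every input tag for membership in it, B keeps a fixed mapping key->set of accepted values and loops over the three target keys, testing tags.get(key) against the value set, so the loop is driven by the fixed targets rather than by the input tags.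
import Mathlib
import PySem

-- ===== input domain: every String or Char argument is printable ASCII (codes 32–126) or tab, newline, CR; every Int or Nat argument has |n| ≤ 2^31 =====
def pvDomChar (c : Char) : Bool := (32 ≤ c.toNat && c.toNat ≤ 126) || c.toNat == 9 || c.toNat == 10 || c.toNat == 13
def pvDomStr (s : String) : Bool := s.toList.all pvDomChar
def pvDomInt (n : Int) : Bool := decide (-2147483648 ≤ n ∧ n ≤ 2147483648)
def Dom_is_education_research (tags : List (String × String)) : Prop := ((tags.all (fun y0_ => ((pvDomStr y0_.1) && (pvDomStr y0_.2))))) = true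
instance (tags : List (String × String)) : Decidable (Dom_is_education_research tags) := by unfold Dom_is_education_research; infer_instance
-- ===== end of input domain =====

-- B changes the decomposition: a fixed mapping key → accepted-value set drives the loop
-- (three tags.get lookups) instead of scanning the input tags against a flat pair list.

-- ===== PORT A =====
-- helper is_any_pair_present: any((key, value) in items for key, value in tags.items())
def is_any_pair_present (tags : List (String × String)) (items : List (String × String)) : Bool :=
  tags.any (fun kv => items.contains kv)

def is_education_research (tags : List (String × String)) : Bool :=
  let items : List (String × String) := []
  let items := items ++ (["school", "college", "language_school", "driving_school",
                          "music_school", "preschool", "kindergarten", "university",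
                          "training", "education", "research_institute"].map
                            (fun val => ("amenity", val)))
  let items := items ++ (["educational_institution", "research"].map (fun val => ("office", val)))
  let items := items ++ (["school", "university"].map (fun val => ("building", val)))
  is_any_pair_present tags items

-- ===== PORT B =====
-- the fixed module-level mapping _TARGETS: key → set of accepted values (PySem.Set as List)
def pvTargets : List (String × List String) :=
  [("amenity", ["school", "college", "language_school", "driving_school",
                "music_school", "preschool", "kindergarten", "university",
                "training", "education", "research_institute"]),
   ("office", ["educational_institution", "research"]),
   ("building", ["school", "university"])]

def is_education_research_alt (tags : List (String × String)) : Bool :=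
  pvTargets.any (fun kvs =>
    match (PySem.Dict.mk tags).get? kvs.1 with
    | some v => kvs.2.contains v
    | none => false)

-- ===== PRECONDITION & SPEC =====
-- Pre_ excludes association lists with duplicate keys: those do not represent a Python
-- dict (dict insertion overwrites), and there A's full scan and B's first-match lookup
-- may defensibly disagree.
def Pre_is_education_research (tags : List (String × String)) : Prop :=
  (tags.map Prod.fst).Nodup
instance (tags : List (String × String)) : Decidable (Pre_is_education_research tags) := by
  unfold Pre_is_education_research; infer_instance

def pvWitness_is_education_research : (List (String × String)) :=
  [("amenity", "school"), ("name", "Gymnasium 1")]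

def Spec_is_education_research (tags : List (String × String)) (out : Bool) : Prop :=
  out = is_education_research_alt tags
instance (tags : List (String × String)) (out : Bool) : Decidable (Spec_is_education_research tags out) := by
  unfold Spec_is_education_research; infer_instance

-- ===== CLAIM (what is proved, stated in full; the proofs are below) =====
def Claim_equal_is_education_research : Prop := ∀ (tags : List (String × String)), Dom_is_education_research tags → Pre_is_education_research tags → Spec_is_education_research tags (is_education_research tags)

-- ===== LEMMAS AND PROOFS =====

-- membership of a concrete pair in A's literal items list, split by target key
theorem mem_items_iff (k v : String) :
    ((k, v) ∈ ([("amenity", "school"), ("amenity", "college"), ("amenity", "language_school"),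
      ("amenity", "driving_school"), ("amenity", "music_school"), ("amenity", "preschool"),
      ("amenity", "kindergarten"), ("amenity", "university"), ("amenity", "training"),
      ("amenity", "education"), ("amenity", "research_institute"),
      ("office", "educational_institution"), ("office", "research"),
      ("building", "school"), ("building", "university")] : List (String × String))) ↔
    (∃ p ∈ pvTargets, p.1 = k ∧ v ∈ p.2) := by
  constructor
  · intro h
    simp only [List.mem_cons, List.not_mem_nil, or_false, Prod.mk.injEq] at h
    simp only [pvTargets, List.mem_cons, List.not_mem_nil, or_false]
    rcases h with ⟨rfl, rfl⟩ | ⟨rfl, rfl⟩ | ⟨rfl, rfl⟩ | ⟨rfl, rfl⟩ | ⟨rfl, rfl⟩ | ⟨rfl, rfl⟩ |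
      ⟨rfl, rfl⟩ | ⟨rfl, rfl⟩ | ⟨rfl, rfl⟩ | ⟨rfl, rfl⟩ | ⟨rfl, rfl⟩ | ⟨rfl, rfl⟩ |
      ⟨rfl, rfl⟩ | ⟨rfl, rfl⟩ | ⟨rfl, rfl⟩ <;> simp
  · rintro ⟨p, hp, rfl, hv⟩
    simp only [pvTargets, List.mem_cons, List.not_mem_nil, or_false] at hp
    rcases hp with rfl | rfl | rfl <;> simp_all

theorem lookup_iff_mem (tags : List (String × String)) (h : (tags.map Prod.fst).Nodup)
    (k v : String) : (PySem.Dict.mk tags).get? k = some v ↔ (k, v) ∈ tags := by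
  have hk : (PySem.Dict.mk tags).keys.Nodup := by simpa [PySem.Dict.keys] using h
  simpa [PySem.Dict.items] using PySem.Dict.get?_eq_some_iff_mem_items (PySem.Dict.mk tags) k v hk

-- ===== VERDICT (by name: the statement is the Claim_ definition above) =====
theorem is_education_research_spec : Claim_equal_is_education_research := by
  intro tags _ hpre
  unfold Spec_is_education_research
  rw [Bool.eq_iff_iff]
  unfold is_education_research is_any_pair_present is_education_research_alt
  simp only [List.nil_append, List.map, List.any_eq_true, List.contains_eq_mem,
    List.cons_append, decide_eq_true_eq]
  constructor
  · rintro ⟨⟨k, v⟩, hmem, hin⟩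
    obtain ⟨p, hp, hk, hv⟩ := (mem_items_iff k v).mp hin
    refine ⟨p, hp, ?_⟩
    rw [hk, (lookup_iff_mem tags hpre k v).mpr hmem]
    simpa using hv
  · rintro ⟨p, hp, hmatch⟩
    rcases hget : (PySem.Dict.mk tags).get? p.1 with _ | v
    · rw [hget] at hmatch; simp at hmatch
    · rw [hget] at hmatch
      simp only [decide_eq_true_eq] at hmatch
      exact ⟨(p.1, v), (lookup_iff_mem tags hpre p.1 v).mp hget,
        by simpa using (mem_items_iff p.1 v).mpr ⟨p, hp, rfl, hmatch⟩⟩
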